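-- pv_equiv track=rewrite | github.com/Korimse/Programmers_Practice | 2018 KAKAO BLIND RECRUITMENT/secret_map.py | solution
-- ===== SOURCE A (Python) =====
-- def ejin(x, n):
--     s = ""
--     for i in range(n):
--         s = str(x%2)+s
--         x //= 2
--     return s
--
-- def solution(n, arr1, arr2):
--     answer = ["" for _ in range(n)]
--     count = 0
--     for i, j in zip(arr1, arr2):
--         a, b = ejin(i, n), ejin(j, n)
--         for k in range(n):
--             if a[k] == '1' or b[k] == '1':
--                 answer[count] += "#"
--             elif a[k] == '0' and b[k] == '0':
--                 answer[count] += ' '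
--         count+=1
--     return answer
-- ===== SOURCE B (Python) =====
-- def solution(n, arr1, arr2):
--     rows = ['' for _ in range(n)]
--     for k, (a, b) in enumerate(zip(arr1, arr2)):
--         rows[k] = f'{(a | b) & (1 << n) - 1:0{n}b}'.replace('1', '#').replace('0', ' ')
--     return rows
-- ===== Notes on version B (the rewrite author's own statement) =====
-- stated objective: idiomatic
-- what changed: B drops A's per-number binary-string builder (ejin) and the per-bit character-comparison loop: each row is one integer OR masked to n low bits, rendered by a single f-string binary format and two str.replace calls; Pre_ excludes inputs with more pairs than n rows, where A raises IndexError for 0 < n and returns [] for n <= 0 only as an accident of its empty preallocated answer list, while B raises.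
-- outside the precondition, e.g. on solution(-1, [1], [1]): A returns [], B raises ValueError; on solution(0, [1], [2]): A returns [], B raises IndexError
import Mathlib
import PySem

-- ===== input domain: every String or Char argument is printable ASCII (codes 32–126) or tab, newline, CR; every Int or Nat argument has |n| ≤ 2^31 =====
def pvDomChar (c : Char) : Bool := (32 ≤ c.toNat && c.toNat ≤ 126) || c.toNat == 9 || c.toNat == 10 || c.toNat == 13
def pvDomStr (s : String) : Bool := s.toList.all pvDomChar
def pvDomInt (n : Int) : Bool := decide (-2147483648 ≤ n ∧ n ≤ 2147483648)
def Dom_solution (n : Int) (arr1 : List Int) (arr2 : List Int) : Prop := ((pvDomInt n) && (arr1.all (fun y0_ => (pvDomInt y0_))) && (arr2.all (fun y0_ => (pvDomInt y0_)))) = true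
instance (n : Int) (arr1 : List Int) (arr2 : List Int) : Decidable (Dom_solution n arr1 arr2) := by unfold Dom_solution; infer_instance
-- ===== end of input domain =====

-- B renders each row by one integer OR masked to n bits, formatted as a padded binary string with
-- '1'/'0' replaced by '#'/' ', instead of building per-number binary strings and comparing them
-- character by character (objective: idiomatic).


-- ===== PORT A =====
-- helper ejin(x, n): builds the n-character binary string by repeated %2 // 2, prepending each digit.
-- (Strings are carried as List Char, per the PySem convention; str(x%2) is PySem.Int.toChars.)
def ejin (x : Int) (n : Int) : List Char :=
  ((PySem.List.pyRange 0 n 1).foldl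
    (fun (st : List Char × Int) _ =>
      (PySem.Int.toChars (PySem.Int.mod st.2 2) ++ st.1, PySem.Int.floordiv st.2 2))
    (([] : List Char), x)).1

-- body of A's inner 'for k in range(n)' loop; a[k] is pyGet? (IndexError only outside Pre_,
-- where Python's answer[count] += … raises; pySetD/pyGetD are its total form under Pre_)
def innerBody (a b : List Char) (c : Int) (ans : List (List Char)) (k : Int) : List (List Char) :=
  if PySem.List.pyGet? a k = some '1' ∨ PySem.List.pyGet? b k = some '1' then
    PySem.List.pySetD ans c (PySem.List.pyGetD ans c [] ++ ['#'])
  else if PySem.List.pyGet? a k = some '0' ∧ PySem.List.pyGet? b k = some '0' then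
    PySem.List.pySetD ans c (PySem.List.pyGetD ans c [] ++ [' '])
  else ans

-- body of A's outer 'for i, j in zip(arr1, arr2)' loop (state: answer, count)
def outerBody (n : Int) (st : List (List Char) × Int) (p : Int × Int) : List (List Char) × Int :=
  let a := ejin p.1 n
  let b := ejin p.2 n
  ((PySem.List.pyRange 0 n 1).foldl (innerBody a b st.2) st.1, st.2 + 1)

def solution (n : Int) (arr1 : List Int) (arr2 : List Int) : List String :=
  let answer : List (List Char) := (PySem.List.pyRange 0 n 1).map (fun _ => ([] : List Char))
  (((arr1.zip arr2).foldl (outerBody n) (answer, 0)).1).map (fun cs => String.ofList cs)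

-- ===== PORT B =====
-- f'{v:0{n}b}': the binary digits of v, zero-padded to width n, MSB first.
-- Exact for 0 ≤ v < 2^n, which holds at every call B makes under Pre_ (v is masked to n low bits, n ≥ 1).
def binFmt (v : Int) (n : Int) : List Char :=
  (List.range n.toNat).reverse.map (fun t => if v.toNat.testBit t then '1' else '0')

-- f'{(a | b) & (1 << n) - 1:0{n}b}'.replace('1', '#').replace('0', ' ')  (n ≥ 1 at every call under Pre_)
def renderRow (n : Int) (p : Int × Int) : String :=
  String.ofList
    (PySem.Chars.replace (PySem.Chars.replace
      (binFmt (PySem.Int.band (PySem.Int.bor p.1 p.2) ((1 : Int) <<< n.toNat - 1)) n)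
      ['1'] ['#']) ['0'] [' '])

def solution_alt (n : Int) (arr1 : List Int) (arr2 : List Int) : List String :=
  let rows : List String := (PySem.List.pyRange 0 n 1).map (fun _ => "")
  (PySem.List.enumerate (arr1.zip arr2)).foldl
    (fun r kp => PySem.List.pySetD r kp.1 (renderRow n kp.2)) rows

-- ===== PRECONDITION & SPEC =====
-- Pre_ admits exactly the inputs with at most n zipped pairs (or none): with more pairs than n,
-- A raises IndexError when 0 < n, and for n ≤ 0 returns [] only as an accident of its empty
-- preallocated answer list; B raises on all of those inputs.
def Pre_solution (n : Int) (arr1 : List Int) (arr2 : List Int) : Prop :=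
  ((min arr1.length arr2.length : Nat) : Int) ≤ n ∨ arr1 = [] ∨ arr2 = []
instance (n : Int) (arr1 : List Int) (arr2 : List Int) : Decidable (Pre_solution n arr1 arr2) := by
  unfold Pre_solution; infer_instance

def pvWitness_solution : Int × List Int × List Int := (2, [1, 2], [2, 1])

def Spec_solution (n : Int) (arr1 : List Int) (arr2 : List Int) (out : List String) : Prop := out = solution_alt n arr1 arr2
instance (n : Int) (arr1 : List Int) (arr2 : List Int) (out : List String) : Decidable (Spec_solution n arr1 arr2 out) := by unfold Spec_solution; infer_instance

-- ===== CLAIM (what is proved, stated in full; the proofs are below) =====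
def Claim_equal_solution : Prop := ∀ (n : Int) (arr1 : List Int) (arr2 : List Int), Dom_solution n arr1 arr2 → Pre_solution n arr1 arr2 → Spec_solution n arr1 arr2 (solution n arr1 arr2)

-- ===== LEMMAS AND PROOFS =====

-- splitting a set at an in-range index
lemma set_eq_split {α : Type} : ∀ (l : List α) (i : Nat) (a : α), i < l.length →
    l.set i a = l.take i ++ a :: l.drop (i + 1)
  | [], i, a, h => by simp at h
  | x :: xs, 0, a, _ => by simp
  | x :: xs, i + 1, a, h => by
      simp only [List.set_cons_succ, List.take_succ_cons, List.drop_succ_cons, List.cons_append]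
      rw [set_eq_split xs i a (by simpa using h)]

lemma take_append_len {α : Type} : ∀ (l1 l2 : List α) (k : Nat),
    (l1 ++ l2).take (l1.length + k) = l1 ++ l2.take k
  | [], l2, k => by simp
  | x :: xs, l2, k => by
      simp only [List.cons_append, List.length_cons]
      rw [show xs.length + 1 + k = (xs.length + k) + 1 by omega]
      simp only [List.take_succ_cons]
      rw [take_append_len xs l2 k]

lemma drop_append_len {α : Type} : ∀ (l1 l2 : List α) (k : Nat),
    (l1 ++ l2).drop (l1.length + k) = l2.drop k
  | [], l2, k => by simp
  | x :: xs, l2, k => by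
      simp only [List.cons_append, List.length_cons]
      rw [show xs.length + 1 + k = (xs.length + k) + 1 by omega]
      simp only [List.drop_succ_cons]
      rw [drop_append_len xs l2 k]

lemma zip_replicate_of_le {α β : Type} : ∀ (l : List α) (m : Nat) (b : β), l.length ≤ m →
    l.zip (List.replicate m b) = l.map (fun a => (a, b))
  | [], m, b, _ => by simp
  | x :: xs, 0, b, h => by simp at h
  | x :: xs, m + 1, b, h => by
      simp only [List.replicate_succ, List.zip_cons_cons, List.map_cons]
      rw [zip_replicate_of_le xs m b (by simpa using h)]

-- bit t of x, as Python computes it (floor semantics on negatives)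
def dig (x : Int) (t : Nat) : Int := PySem.Int.mod (x >>> t) 2

def chD (x : Int) (t : Nat) : Char := if dig x t = 1 then '1' else '0'

-- the character list of A's row for one pair
def rowA (n : Int) (p : Int × Int) : List Char :=
  (PySem.List.pyRange 0 n 1).map (fun k =>
    if PySem.List.pyGet? (ejin p.1 n) k = some '1' ∨ PySem.List.pyGet? (ejin p.2 n) k = some '1'
    then '#' else ' ')

lemma shiftRight_zero' (x : Int) : x >>> (0 : Nat) = x := by
  cases x <;> rfl

lemma fd2 (x : Int) : PySem.Int.floordiv x 2 = x >>> (1 : Nat) := by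
  rw [PySem.Int.floordiv_eq_ediv_of_pos (by norm_num)]
  cases x with
  | ofNat m =>
    show (Int.ofNat m) / 2 = Int.ofNat (m >>> 1)
    simp [Nat.shiftRight_eq_div_pow]
  | negSucc m =>
    show (Int.negSucc m) / 2 = Int.negSucc (m >>> 1)
    simp [Nat.shiftRight_eq_div_pow]
    omega

lemma dig_shift (x : Int) (t : Nat) : dig (x >>> (1 : Nat)) t = dig x (t + 1) := by
  unfold dig
  rw [show t + 1 = 1 + t by omega, Int.shiftRight_add]

lemma dig01 (x : Int) (t : Nat) : dig x t = 0 ∨ dig x t = 1 := by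
  have h1 := PySem.Int.mod_nonneg (x >>> t) (b := 2) (by norm_num)
  have h2 := PySem.Int.mod_lt (x >>> t) (b := 2) (by norm_num)
  unfold dig; omega

lemma toChars_mod_two (x : Int) : PySem.Int.toChars (PySem.Int.mod x 2) = [chD x 0] := by
  have hx : PySem.Int.mod x 2 = dig x 0 := by unfold dig; rw [shiftRight_zero']
  rcases dig01 x 0 with h | h <;>
    · rw [hx, h]; unfold chD; rw [h]; decide

lemma ejin_loop (l : List Int) : ∀ (s : List Char) (x : Int),
    (l.foldl
      (fun (st : List Char × Int) _ =>
        (PySem.Int.toChars (PySem.Int.mod st.2 2) ++ st.1, PySem.Int.floordiv st.2 2))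
      (s, x))
    = ((List.range l.length).reverse.map (chD x) ++ s, x >>> l.length) := by
  induction l with
  | nil => intro s x; simp
  | cons hd tl ih =>
    intro s x
    simp only [List.foldl_cons, List.length_cons]
    rw [toChars_mod_two, fd2, ih]
    simp only [Prod.mk.injEq]
    refine ⟨?_, ?_⟩
    · simp only [List.range_succ_eq_map, List.map_cons, List.reverse_cons,
        List.map_map, List.map_reverse, List.map_append]
      simp [Function.comp, dig_shift, chD, List.append_assoc]
    · rw [show tl.length + 1 = 1 + tl.length by omega, Int.shiftRight_add]

lemma ejin_eq (x n : Int) : ejin x n = (List.range n.toNat).reverse.map (chD x) := by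
  unfold ejin
  rw [ejin_loop]
  simp [PySem.List.length_pyRange_one]

lemma ejin_length (x n : Int) : (ejin x n).length = n.toNat := by
  simp [ejin_eq]

lemma ejin_getElem (x n : Int) (k : Nat) (hk : k < n.toNat) :
    (ejin x n)[k]'(by simp [ejin_length, hk]) = chD x (n.toNat - 1 - k) := by
  simp [ejin_eq, List.getElem_reverse, List.getElem_map, List.getElem_range]

lemma inner_loop (a b : List Char) (c : Int) (hc : 0 ≤ c) (l : List Int)
    (h : ∀ k ∈ l, (PySem.List.pyGet? a k = some '1' ∨ PySem.List.pyGet? a k = some '0')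
               ∧ (PySem.List.pyGet? b k = some '1' ∨ PySem.List.pyGet? b k = some '0')) :
    ∀ (ans : List (List Char)), c.toNat < ans.length →
    l.foldl (innerBody a b c) ans
      = PySem.List.pySetD ans c (PySem.List.pyGetD ans c [] ++ l.map (fun k =>
          if PySem.List.pyGet? a k = some '1' ∨ PySem.List.pyGet? b k = some '1'
          then '#' else ' ')) := by
  have hc' : ((c.toNat : Int)) = c := Int.toNat_of_nonneg hc
  induction l with
  | nil =>
    intro ans hlen
    rw [List.foldl_nil, List.map_nil, List.append_nil,
      PySem.List.pySetD_of_nonneg _ _ hc,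
      PySem.List.pyGetD_eq_getElem _ _ hc (by omega)]
    exact (List.set_getElem_self (by omega)).symm
  | cons k l ih =>
    intro ans hlen
    have hk := h k (List.mem_cons_self)
    have hrest := fun k' hk' => h k' (List.mem_cons_of_mem k hk')
    rw [List.foldl_cons]
    have step : ∀ (ch : Char),
        innerBody a b c ans k = PySem.List.pySetD ans c (PySem.List.pyGetD ans c [] ++ [ch]) →
        (if PySem.List.pyGet? a k = some '1' ∨ PySem.List.pyGet? b k = some '1'
          then '#' else ' ') = ch →
        List.foldl (innerBody a b c) (innerBody a b c ans k) l
          = PySem.List.pySetD ans c (PySem.List.pyGetD ans c [] ++ List.map (fun k =>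
              if PySem.List.pyGet? a k = some '1' ∨ PySem.List.pyGet? b k = some '1'
              then '#' else ' ') (k :: l)) := by
      intro ch hbody hch
      rw [hbody, ih hrest _ (by rw [PySem.List.length_pySetD]; exact hlen)]
      rw [← hc']
      rw [PySem.List.pyGetD_pySetD_natCast ans c.toNat c.toNat _ [] (by omega), if_pos rfl]
      rw [PySem.List.pySetD_natCast, PySem.List.pySetD_natCast, PySem.List.pySetD_natCast]
      simp only [List.set_set, List.map_cons, hch, List.append_assoc, List.singleton_append]
    by_cases hcond : PySem.List.pyGet? a k = some '1' ∨ PySem.List.pyGet? b k = some '1'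
    · exact step '#' (by unfold innerBody; rw [if_pos hcond]) (if_pos hcond)
    · have ha : PySem.List.pyGet? a k = some '0' := by tauto
      have hb : PySem.List.pyGet? b k = some '0' := by tauto
      exact step ' ' (by unfold innerBody; rw [if_neg hcond, if_pos ⟨ha, hb⟩]) (if_neg hcond)

lemma outer_loop (n : Int) (ps : List (Int × Int))
    (hrow : ∀ p ∈ ps, ∀ k ∈ PySem.List.pyRange 0 n 1,
        (PySem.List.pyGet? (ejin p.1 n) k = some '1' ∨ PySem.List.pyGet? (ejin p.1 n) k = some '0')
      ∧ (PySem.List.pyGet? (ejin p.2 n) k = some '1' ∨ PySem.List.pyGet? (ejin p.2 n) k = some '0')) :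
    ∀ (ans : List (List Char)) (cn : Nat), cn + ps.length ≤ ans.length →
    (ps.foldl (outerBody n) (ans, (cn : Int))).1
      = ans.take cn ++ (ps.zip (ans.drop cn)).map (fun q => q.2 ++ rowA n q.1)
          ++ ans.drop (cn + ps.length) := by
  induction ps with
  | nil =>
    intro ans cn _
    simp [List.take_append_drop]
  | cons p ps ih =>
    intro ans cn hlen
    have hcn : cn < ans.length := by
      simp only [List.length_cons] at hlen; omega
    have hinner := inner_loop (ejin p.1 n) (ejin p.2 n) ((cn : Nat) : Int)
      (by positivity) _ (hrow p List.mem_cons_self) ans (by simpa using hcn)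
    have hstep : outerBody n (ans, ((cn : Nat) : Int)) p
        = (ans.set cn (ans[cn] ++ rowA n p), ((cn : Nat) : Int) + 1) := by
      show ((PySem.List.pyRange 0 n 1).foldl
          (innerBody (ejin p.1 n) (ejin p.2 n) ((cn : Nat) : Int)) ans, ((cn : Nat) : Int) + 1) = _
      rw [hinner, PySem.List.pySetD_natCast, PySem.List.pyGetD_natCast,
        List.getD_eq_getElem ans _ hcn]
      rfl
    rw [List.foldl_cons, hstep,
      show ((cn : Nat) : Int) + 1 = (((cn + 1 : Nat)) : Int) by push_cast; ring,
      ih (fun q hq => hrow q (List.mem_cons_of_mem p hq)) _ _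
        (by rw [List.length_set]; simp only [List.length_cons] at hlen; omega)]
    have htk : (ans.take cn).length = cn := by
      simp only [List.length_take]; omega
    rw [set_eq_split ans cn _ hcn]
    have e1 : (ans.take cn ++ (ans[cn] ++ rowA n p) :: ans.drop (cn + 1)).take (cn + 1)
        = ans.take cn ++ [ans[cn] ++ rowA n p] := by
      rw [show cn + 1 = (ans.take cn).length + 1 by rw [htk], take_append_len]
      simp
    have e2 : (ans.take cn ++ (ans[cn] ++ rowA n p) :: ans.drop (cn + 1)).drop (cn + 1)
        = ans.drop (cn + 1) := by
      rw [show cn + 1 = (ans.take cn).length + 1 by rw [htk], drop_append_len]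
      simp
    have e3 : (ans.take cn ++ (ans[cn] ++ rowA n p) :: ans.drop (cn + 1)).drop (cn + 1 + ps.length)
        = ans.drop (cn + 1 + ps.length) := by
      rw [show cn + 1 + ps.length = (ans.take cn).length + (ps.length + 1) by rw [htk]; omega,
        drop_append_len]
      simp only [List.drop_succ_cons, List.drop_drop]
      congr 1; omega
    rw [e1, e2, e3, List.drop_eq_getElem_cons hcn]
    simp only [List.zip_cons_cons, List.map_cons, List.length_cons, List.append_assoc,
      List.cons_append, List.nil_append]
    rw [show cn + (ps.length + 1) = cn + 1 + ps.length by omega]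

lemma ejin_char_eq (x n : Int) (u : Nat) (hu : u < n.toNat) :
    PySem.List.pyGet? (ejin x n) ((u : Nat) : Int) = some (chD x (n.toNat - 1 - u)) := by
  rw [PySem.List.pyGet?_natCast]
  rw [List.getElem?_eq_getElem (by simp [ejin_length, hu])]
  rw [ejin_getElem x n u hu]

lemma ejin_chars (x n : Int) (k : Int) (hk : k ∈ PySem.List.pyRange 0 n 1) :
    PySem.List.pyGet? (ejin x n) k = some '1' ∨ PySem.List.pyGet? (ejin x n) k = some '0' := by
  rw [PySem.List.mem_pyRange_one] at hk
  have hk' : k = ((k.toNat : Nat) : Int) := by omega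
  have hu : k.toNat < n.toNat := by omega
  rw [hk', ejin_char_eq x n k.toNat hu]
  rcases dig01 x (n.toNat - 1 - k.toNat) with d | d <;> simp [chD, d]

-- ---- Nat bit lemmas for B's mask-and-format rendering ----

lemma land_div_two (m k : Nat) : (m &&& k) / 2 = (m / 2) &&& (k / 2) := by
  apply Nat.eq_of_testBit_eq
  intro i
  simp [Nat.testBit_div_two]

lemma ldiff_div_two (m k : Nat) : (m.ldiff k) / 2 = (m / 2).ldiff (k / 2) := by
  apply Nat.eq_of_testBit_eq
  intro i
  simp [Nat.testBit_div_two, Nat.testBit_ldiff]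

lemma land_mod_two (m k : Nat) : (m &&& k) % 2 = if m % 2 = 1 ∧ k % 2 = 1 then 1 else 0 := by
  have h := Nat.testBit_land m k 0
  simp only [Nat.testBit_zero] at h
  rcases Nat.mod_two_eq_zero_or_one m with h1 | h1 <;>
    rcases Nat.mod_two_eq_zero_or_one k with h2 | h2 <;>
      rcases Nat.mod_two_eq_zero_or_one (m &&& k) with h3 | h3 <;>
        simp [h1, h2, h3] at h ⊢

lemma ldiff_mod_two (m k : Nat) : (m.ldiff k) % 2 = if m % 2 = 1 ∧ ¬ k % 2 = 1 then 1 else 0 := by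
  have h := Nat.testBit_ldiff m k 0
  simp only [Nat.testBit_zero] at h
  rcases Nat.mod_two_eq_zero_or_one m with h1 | h1 <;>
    rcases Nat.mod_two_eq_zero_or_one k with h2 | h2 <;>
      rcases Nat.mod_two_eq_zero_or_one (m.ldiff k) with h3 | h3 <;>
        simp [h1, h2, h3] at h ⊢

-- m = (m &&& k) + (m \ k), so the Nat subtraction in PySem's bitwise formulas is ldiff
lemma land_add_ldiff (m k : Nat) : (m &&& k) + m.ldiff k = m := by
  induction m using Nat.strong_induction_on generalizing k with
  | _ m ih =>
    rcases Nat.eq_zero_or_pos m with hm | hm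
    · subst hm
      have a1 : (0 &&& k) = 0 := by
        apply Nat.eq_of_testBit_eq; intro i; simp
      have a2 : Nat.ldiff 0 k = 0 := by
        apply Nat.eq_of_testBit_eq; intro i; simp [Nat.testBit_ldiff]
      omega
    · have ihh := ih (m / 2) (by omega) (k / 2)
      have e1 := land_div_two m k
      have e2 := ldiff_div_two m k
      have e3 := land_mod_two m k
      have e4 := ldiff_mod_two m k
      split_ifs at e3 e4 <;> omega

lemma sub_land (m k : Nat) : m - (m &&& k) = m.ldiff k := by
  have := land_add_ldiff m k
  omega

-- ---- Int bit lemmas ----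

lemma int_testBit_negSucc (m : Nat) (t : Nat) : (Int.negSucc m).testBit t = !(m.testBit t) := rfl

lemma int_testBit_natCast (m : Nat) (t : Nat) : ((m : Int)).testBit t = m.testBit t := rfl

-- PySem's Python-exact | and & coincide with Mathlib's Int.lor / Int.land
lemma bor_eq_lor (a b : Int) : PySem.Int.bor a b = Int.lor a b := by
  cases a with
  | ofNat m =>
    cases b with
    | ofNat k => simp [PySem.Int.bor, Int.lor]
    | negSucc k =>
      simp only [PySem.Int.bor, Int.lor]
      rw [if_pos (by exact Int.natCast_nonneg m), if_neg (by omega)]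
      rw [show (-(Int.negSucc k) - 1).toNat = k by rw [Int.negSucc_eq]; omega]
      rw [show (Int.ofNat m).toNat = m from rfl, sub_land]
      rw [Int.negSucc_eq]; ring
  | negSucc m =>
    cases b with
    | ofNat k =>
      simp only [PySem.Int.bor, Int.lor]
      rw [if_neg (by omega), if_pos (by exact Int.natCast_nonneg k)]
      rw [show (-(Int.negSucc m) - 1).toNat = m by rw [Int.negSucc_eq]; omega]
      rw [show (Int.ofNat k).toNat = k from rfl, sub_land]
      rw [Int.negSucc_eq]; ring
    | negSucc k =>
      simp only [PySem.Int.bor, Int.lor]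
      rw [if_neg (by omega), if_neg (by omega)]
      rw [show (-(Int.negSucc m) - 1).toNat = m by rw [Int.negSucc_eq]; omega]
      rw [show (-(Int.negSucc k) - 1).toNat = k by rw [Int.negSucc_eq]; omega]
      rw [Int.negSucc_eq]; ring

lemma band_eq_land (a b : Int) : PySem.Int.band a b = Int.land a b := by
  cases a with
  | ofNat m =>
    cases b with
    | ofNat k => simp [PySem.Int.band, Int.land]
    | negSucc k =>
      simp only [PySem.Int.band, Int.land]
      rw [if_pos (by exact Int.natCast_nonneg m), if_neg (by omega)]
      rw [show (-(Int.negSucc k) - 1).toNat = k by rw [Int.negSucc_eq]; omega]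
      rw [show (Int.ofNat m).toNat = m from rfl, sub_land]
  | negSucc m =>
    cases b with
    | ofNat k =>
      simp only [PySem.Int.band, Int.land]
      rw [if_neg (by omega), if_pos (by exact Int.natCast_nonneg k)]
      rw [show (-(Int.negSucc m) - 1).toNat = m by rw [Int.negSucc_eq]; omega]
      rw [show (Int.ofNat k).toNat = k from rfl, sub_land]
    | negSucc k =>
      simp only [PySem.Int.band, Int.land]
      rw [if_neg (by omega), if_neg (by omega)]
      rw [show (-(Int.negSucc m) - 1).toNat = m by rw [Int.negSucc_eq]; omega]
      rw [show (-(Int.negSucc k) - 1).toNat = k by rw [Int.negSucc_eq]; omega]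
      rw [Int.negSucc_eq]; ring

lemma bor_testBit (a b : Int) (t : Nat) :
    (PySem.Int.bor a b).testBit t = (a.testBit t || b.testBit t) := by
  rw [bor_eq_lor]
  exact Int.testBit_lor a b t

lemma band_testBit (a b : Int) (t : Nat) :
    (PySem.Int.band a b).testBit t = (a.testBit t && b.testBit t) := by
  rw [band_eq_land]
  exact Int.testBit_land a b t

-- Python's bit t (A's digit, via %2 and //2) is testBit
lemma dig_testBit (x : Int) (t : Nat) : dig x t = if x.testBit t then 1 else 0 := by
  cases x with
  | ofNat m =>
    have hs : (Int.ofNat m) >>> t = Int.ofNat (m >>> t) := rfl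
    unfold dig
    rw [hs]
    rw [show (Int.ofNat (m >>> t)) = ((m >>> t : Nat) : Int) from rfl]
    rw [show ((2 : Int)) = ((2 : Nat) : Int) from rfl, PySem.Int.mod_natCast]
    rw [show (Int.ofNat m).testBit t = m.testBit t from rfl,
      Nat.testBit_eq_decide_div_mod_eq, Nat.shiftRight_eq_div_pow]
    have : m / 2 ^ t % 2 = 0 ∨ m / 2 ^ t % 2 = 1 := by omega
    rcases this with h | h <;> simp [h]
  | negSucc m =>
    have hs : (Int.negSucc m) >>> t = Int.negSucc (m >>> t) := Int.negSucc_shiftRight m t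
    unfold dig
    rw [hs, int_testBit_negSucc, Nat.testBit_eq_decide_div_mod_eq, Nat.shiftRight_eq_div_pow]
    rw [PySem.Int.mod_eq_emod_of_pos (by norm_num)]
    rw [show Int.negSucc (m / 2 ^ t) = -((m / 2 ^ t : Nat) : Int) - 1 by rw [Int.negSucc_eq]; ring]
    have h2 : m / 2 ^ t % 2 = 0 ∨ m / 2 ^ t % 2 = 1 := by omega
    have hc : ((m / 2 ^ t : Nat) : Int) % 2 = ((m / 2 ^ t % 2 : Nat) : Int) := by push_cast; omega
    rcases h2 with h | h <;> simp only [h] <;> rw [h] at hc <;> push_cast at hc <;> simp <;> omega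

lemma chD_one_iff (x : Int) (t : Nat) : chD x t = '1' ↔ x.testBit t = true := by
  unfold chD
  rw [dig_testBit]
  cases x.testBit t <;> simp

-- (1 : Int) <<< k - 1 is the k-bit mask
lemma one_shiftl (k : Nat) : ((1 : Int) <<< k) = ((2 ^ k : Nat) : Int) := by
  have : (1 : Int) <<< k = Int.ofNat (1 <<< k) := rfl
  rw [this]
  simp [Nat.shiftLeft_eq]

lemma mask_testBit (k : Nat) (t : Nat) :
    ((1 : Int) <<< k - 1).testBit t = decide (t < k) := by
  rw [one_shiftl]
  have h1 : (1 : Nat) ≤ 2 ^ k := Nat.one_le_two_pow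
  rw [show ((2 ^ k : Nat) : Int) - 1 = ((2 ^ k - 1 : Nat) : Int) by push_cast [h1]; ring]
  rw [int_testBit_natCast]
  simp [Nat.testBit_two_pow_sub_one]

-- the masked OR: nonnegative, and its Nat bits below k are the OR of A's digits
lemma maskedOr_nonneg (a b : Int) (k : Nat) :
    0 ≤ PySem.Int.band (PySem.Int.bor a b) ((1 : Int) <<< k - 1) := by
  rw [PySem.Int.band_comm]
  apply PySem.Int.band_nonneg_of_nonneg_left
  rw [one_shiftl]
  have : (1 : Nat) ≤ 2 ^ k := Nat.one_le_two_pow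
  omega

lemma maskedOr_toNat_testBit (a b : Int) (k : Nat) (t : Nat) :
    (PySem.Int.band (PySem.Int.bor a b) ((1 : Int) <<< k - 1)).toNat.testBit t
      = ((a.testBit t || b.testBit t) && decide (t < k)) := by
  set v := PySem.Int.band (PySem.Int.bor a b) ((1 : Int) <<< k - 1) with hv
  have h0 : 0 ≤ v := maskedOr_nonneg a b k
  have hcast : v = ((v.toNat : Nat) : Int) := (Int.toNat_of_nonneg h0).symm
  have := band_testBit (PySem.Int.bor a b) ((1 : Int) <<< k - 1) t
  rw [← hv, hcast, int_testBit_natCast] at this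
  rw [this, bor_testBit, mask_testBit]

-- ---- str.replace with single-character pattern is a character map ----

lemma replace_go_single (o m : Char) : ∀ (s : List Char) (fuel : Nat) (acc : List Char),
    s.length ≤ fuel →
    PySem.Chars.replace.go [o] [m] fuel s acc
      = acc.reverse ++ s.map (fun c => if c = o then m else c)
  | [], fuel, acc, _ => by
      cases fuel <;> simp [PySem.Chars.replace.go]
  | c :: t, fuel + 1, acc, h => by
      rw [PySem.Chars.replace.go]
      by_cases hc : c = o
      · rw [if_pos (by simp [hc, List.isPrefixOf])]
        rw [replace_go_single o m _ fuel _ (by simpa using h)]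
        simp [hc]
      · rw [if_neg (by simp [List.isPrefixOf]; exact fun he => absurd he.symm hc)]
        rw [replace_go_single o m _ fuel _ (by simpa using h)]
        simp [hc]

lemma replace_single (o m : Char) (s : List Char) :
    PySem.Chars.replace s [o] [m] = s.map (fun c => if c = o then m else c) := by
  rw [PySem.Chars.replace]
  rw [if_neg (by simp)]
  rw [replace_go_single o m s s.length [] (le_refl _)]
  simp

-- ---- the row equality ----

lemma reverse_range_map {α : Type} (k : Nat) (g : Nat → α) :
    (List.range k).reverse.map g = (List.range k).map (fun u => g (k - 1 - u)) := by
  apply List.ext_getElem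
  · simp
  · intro i h1 h2
    simp only [List.getElem_map, List.getElem_reverse, List.length_range,
      List.getElem_range] at *

lemma rowA_eq (n : Int) (p : Int × Int) :
    rowA n p = (List.range n.toNat).map (fun u =>
      if p.1.testBit (n.toNat - 1 - u) = true ∨ p.2.testBit (n.toNat - 1 - u) = true
      then '#' else ' ') := by
  unfold rowA
  rw [PySem.List.pyRange_one]
  rw [show (n - 0).toNat = n.toNat by omega]
  rw [List.map_map]
  apply List.map_congr_left
  intro u hu
  simp only [List.mem_range] at hu
  simp only [Function.comp]
  simp only [show (0 : Int) + (u : Int) = ((u : Nat) : Int) from by omega,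
    ejin_char_eq p.1 n u hu, ejin_char_eq p.2 n u hu, Option.some.injEq]
  simp only [chD_one_iff]

lemma renderRow_eq (n : Int) (p : Int × Int) :
    renderRow n p = String.ofList (rowA n p) := by
  unfold renderRow
  congr 1
  rw [replace_single, replace_single, binFmt]
  rw [List.map_map, List.map_map, reverse_range_map, rowA_eq]
  apply List.map_congr_left
  intro u hu
  simp only [List.mem_range] at hu
  simp only [Function.comp]
  have ht : n.toNat - 1 - u < n.toNat := by omega
  rw [maskedOr_toNat_testBit p.1 p.2 n.toNat (n.toNat - 1 - u)]
  by_cases h1 : p.1.testBit (n.toNat - 1 - u) = true <;>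
    by_cases h2 : p.2.testBit (n.toNat - 1 - u) = true <;>
      simp [h1, h2, ht]

-- ---- B's fill loop over enumerate ----

lemma fill_loop (g : Int × Int → String) : ∀ (ps : List (Int × Int)) (s : Nat) (rows : List String),
    s + ps.length ≤ rows.length →
    (PySem.List.enumerate ps ((s : Nat) : Int)).foldl
        (fun r kp => PySem.List.pySetD r kp.1 (g kp.2)) rows
      = rows.take s ++ ps.map g ++ rows.drop (s + ps.length)
  | [], s, rows, _ => by
      simp [PySem.List.enumerate_nil, List.take_append_drop]
  | p :: ps, s, rows, h => by
      rw [PySem.List.enumerate_cons, List.foldl_cons]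
      have hs : s < rows.length := by simp only [List.length_cons] at h; omega
      have hset : PySem.List.pySetD rows ((s : Nat) : Int) (g p) = rows.set s (g p) :=
        PySem.List.pySetD_natCast rows s (g p)
      rw [hset, show ((s : Nat) : Int) + 1 = (((s + 1 : Nat)) : Int) by push_cast; ring]
      rw [fill_loop g ps (s + 1) _ (by rw [List.length_set]; simp only [List.length_cons] at h; omega)]
      have htk : ((rows.set s (g p)).take s) = rows.take s := by
        apply List.ext_getElem
        · simp
        · intro i hi1 hi2
          simp only [List.length_take, List.length_set] at hi1
          rw [List.getElem_take, List.getElem_take, List.getElem_set_ne (by omega)]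
      rw [set_eq_split rows s _ hs] at htk ⊢
      have hlen : (rows.take s).length = s := by simp only [List.length_take]; omega
      have e1 : ((rows.take s ++ g p :: rows.drop (s + 1)).take (s + 1))
          = rows.take s ++ [g p] := by
        rw [show s + 1 = (rows.take s).length + 1 by rw [hlen], take_append_len]
        simp
      have e2 : ((rows.take s ++ g p :: rows.drop (s + 1)).drop (s + 1 + ps.length))
          = rows.drop (s + 1 + ps.length) := by
        rw [show s + 1 + ps.length = (rows.take s).length + (ps.length + 1) by rw [hlen]; omega,
          drop_append_len]
        simp only [List.drop_succ_cons, List.drop_drop]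
        congr 1; omega
      rw [e1, e2]
      simp only [List.map_cons, List.append_assoc, List.cons_append, List.nil_append,
        List.length_cons]
      rw [show s + (ps.length + 1) = s + 1 + ps.length by omega]

-- ===== VERDICT (by name: the statement is the Claim_ definition above) =====
theorem solution_spec : Claim_equal_solution := by
  intro n arr1 arr2 _hdom hpre
  unfold Spec_solution
  by_cases hz : arr1.zip arr2 = []
  · -- no pairs: both sides keep the n preallocated empty rows
    simp only [solution, solution_alt, hz, PySem.List.enumerate_nil, List.foldl_nil,
      List.map_map]
    apply List.map_congr_left
    intro x _
    rfl
  · -- at least one pair: Pre_ gives (zip length) ≤ n, so n ≥ 1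
    have hzl : (arr1.zip arr2).length = min arr1.length arr2.length := List.length_zip
    have hne : (arr1.zip arr2).length ≠ 0 := fun h => hz (List.eq_nil_of_length_eq_zero h)
    have hmin : ((min arr1.length arr2.length : Nat) : Int) ≤ n := by
      rcases hpre with h | h | h
      · exact h
      · exfalso; apply hne; rw [hzl, h]; simp
      · exfalso; apply hne; rw [hzl, h]; simp
    have hm : (arr1.zip arr2).length ≤ n.toNat := by omega
    have hn : 0 < n := by omega
    simp only [solution, solution_alt]
    have hans : (PySem.List.pyRange 0 n 1).map (fun _ => ([] : List Char))
        = List.replicate n.toNat ([] : List Char) := by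
      rw [List.eq_replicate_iff]
      refine ⟨by simp [PySem.List.length_pyRange_one], ?_⟩
      intro b hb
      simp only [List.mem_map] at hb
      tauto
    have hrows : (PySem.List.pyRange 0 n 1).map (fun _ => ("" : String))
        = List.replicate n.toNat ("" : String) := by
      rw [List.eq_replicate_iff]
      refine ⟨by simp [PySem.List.length_pyRange_one], ?_⟩
      intro b hb
      simp only [List.mem_map] at hb
      tauto
    rw [hans, hrows]
    have hrowh : ∀ p ∈ arr1.zip arr2, ∀ k ∈ PySem.List.pyRange 0 n 1,
        (PySem.List.pyGet? (ejin p.1 n) k = some '1' ∨ PySem.List.pyGet? (ejin p.1 n) k = some '0')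
      ∧ (PySem.List.pyGet? (ejin p.2 n) k = some '1' ∨ PySem.List.pyGet? (ejin p.2 n) k = some '0') :=
      fun p _ k hk => ⟨ejin_chars p.1 n k hk, ejin_chars p.2 n k hk⟩
    have HO := outer_loop n (arr1.zip arr2) hrowh (List.replicate n.toNat []) 0
      (by simp only [List.length_replicate]; omega)
    rw [Nat.cast_zero] at HO
    have HB := fill_loop (renderRow n) (arr1.zip arr2) 0 (List.replicate n.toNat "")
      (by simp only [List.length_replicate]; omega)
    rw [Nat.cast_zero] at HB
    rw [HO, HB]
    simp only [List.take_zero, List.drop_zero, List.nil_append, Nat.zero_add]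
    rw [zip_replicate_of_le (arr1.zip arr2) n.toNat ([] : List Char) hm]
    rw [List.drop_replicate, List.drop_replicate, List.map_append, List.map_map, List.map_map,
      List.map_replicate]
    congr 1
    apply List.map_congr_left
    intro p _
    simp only [Function.comp]
    rw [renderRow_eq n p]
    simp
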